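-- pv_equiv track=rewrite | github.com/wyk18703232953/myResearch | codeComplex/data copy/filteredData/python/nlogn/python_nlogn_0198.py | almost_difference
-- ===== SOURCE A (Python) =====
-- def almost_difference(array):
--     n = len(array)
--     if n == 1:
--         return 0
--     dict_equal = dict()
--     ad_sum = 0
--     prev_sum = 0
--     for i in range(n):
--         v = array[i]
--         if v not in dict_equal:
--             dict_equal[v] = 0
--         if v - 1 not in dict_equal:
--             dict_equal[v - 1] = 0
--         if v + 1 not in dict_equal:
--             dict_equal[v + 1] = 0
--         ad_sum = ad_sum + i * v - prev_sum + dict_equal[v + 1] - dict_equal[v - 1]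
--         dict_equal[v] += 1
--         prev_sum += v
--     return ad_sum
-- ===== SOURCE B (Python) =====
-- def almost_difference(array):
--     if len(array) < 2:
--         return 0
--     mid = len(array) // 2
--     left = array[:mid]
--     right = array[mid:]
--     cnt = {}
--     for u in left:
--         cnt[u] = cnt.get(u, 0) + 1
--     cross = len(left) * sum(right) - len(right) * sum(left)
--     for v in right:
--         cross -= cnt.get(v - 1, 0) - cnt.get(v + 1, 0)
--     return almost_difference(left) + almost_difference(right) + cross
-- ===== Notes on version B (the rewrite author's own statement) =====
-- stated objective: alternative
-- what changed: A's single fused left-to-right pass (prefix sum, index product and a counting dict) is replaced by divide and conquer: recurse on the two halves and add a cross term |L|*sum(R) - |R|*sum(L) corrected by a counter of the left half, trading A's O(n) pass for an O(n log n) recursion with no index arithmetic or running prefix state.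
import Mathlib
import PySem

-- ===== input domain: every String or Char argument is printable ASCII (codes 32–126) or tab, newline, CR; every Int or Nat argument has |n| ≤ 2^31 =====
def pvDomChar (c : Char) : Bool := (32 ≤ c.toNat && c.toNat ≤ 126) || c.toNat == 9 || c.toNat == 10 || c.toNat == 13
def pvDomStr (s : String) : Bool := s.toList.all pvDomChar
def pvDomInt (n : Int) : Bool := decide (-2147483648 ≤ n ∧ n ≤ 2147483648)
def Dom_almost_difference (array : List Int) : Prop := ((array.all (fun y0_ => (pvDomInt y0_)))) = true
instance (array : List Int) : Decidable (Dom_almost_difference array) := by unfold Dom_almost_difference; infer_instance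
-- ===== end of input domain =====

-- B replaces A's single fused left-to-right pass (prefix sum + counting dict) by a
-- divide-and-conquer recursion on the two halves with a counter-corrected cross term
-- (objective: alternative algorithm, not faster).

-- ===== PORT A =====
-- loop body of A's 'for i in range(n)' (state: dict_equal, ad_sum, prev_sum)
def pvStepA (s : PySem.Dict Int Int × Int × Int) (iv : Int × Int) : PySem.Dict Int Int × Int × Int :=
  let d0 := s.1
  let v := iv.2
  let d1 := if d0.contains v then d0 else d0.insert v 0
  let d2 := if d1.contains (v - 1) then d1 else d1.insert (v - 1) 0
  let d3 := if d2.contains (v + 1) then d2 else d2.insert (v + 1) 0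
  let ad := s.2.1 + iv.1 * v - s.2.2 + d3.getD (v + 1) 0 - d3.getD (v - 1) 0
  (d3.modify v 0 (· + 1), ad, s.2.2 + v)

def almost_difference (array : List Int) : Int :=
  let n := PySem.List.len array
  if n = 1 then 0
  else ((PySem.List.enumerate array).foldl pvStepA (PySem.Dict.empty, 0, 0)).2.1

-- ===== PORT B =====
-- 'len(array) // 2' with len a Nat cast (cited by the port's termination proof)
theorem pv_mid (n : Nat) : PySem.Int.floordiv (n : Int) 2 = ((n / 2 : Nat) : Int) := by
  exact_mod_cast PySem.Int.floordiv_natCast n 2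

def almost_difference_alt (array : List Int) : Int :=
  if PySem.List.len array < 2 then 0
  else
    let mid := PySem.Int.floordiv (PySem.List.len array) 2
    let left := PySem.List.slice array none (some mid)
    let right := PySem.List.slice array (some mid) none
    let cnt := left.foldl (fun d u => d.insert u (d.getD u 0 + 1)) PySem.Dict.empty
    let cross0 := PySem.List.len left * right.sum - PySem.List.len right * left.sum
    let cross := right.foldl (fun c v => c - (cnt.getD (v - 1) 0 - cnt.getD (v + 1) 0)) cross0
    almost_difference_alt left + almost_difference_alt right + cross
termination_by array.length
decreasing_by
  · simp only [PySem.List.len_eq, pv_mid, PySem.List.slice_to_natCast, List.length_take] at *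
    omega
  · simp only [PySem.List.len_eq, pv_mid, PySem.List.slice_from_natCast, List.length_drop] at *
    omega

-- ===== PRECONDITION & SPEC =====
def Spec_almost_difference (array : List Int) (out : Int) : Prop := out = almost_difference_alt array
instance (array : List Int) (out : Int) : Decidable (Spec_almost_difference array out) := by unfold Spec_almost_difference; infer_instance

-- ===== CLAIM (what is proved, stated in full; the proofs are below) =====
def Claim_equal_almost_difference : Prop := ∀ (array : List Int), Dom_almost_difference array → Spec_almost_difference array (almost_difference array)

-- ===== LEMMAS AND PROOFS =====

-- canonical form both ports are reduced to: a fold keeping (total, seen elements)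
def pvInner (v : Int) (total : Int) (prev : List Int) : Int :=
  prev.foldl (fun t u => if v - u ≠ 1 ∧ v - u ≠ -1 then t + (v - u) else t) total

def pvStepB (s : Int × List Int) (v : Int) : Int × List Int :=
  (pvInner v s.1 s.2, s.2 ++ [v])

def pvTot (l : List Int) : Int := (l.foldl pvStepB (0, [])).1

-- pvInner in closed form: t + |p|·v − Σp + count(v+1) − count(v−1)
theorem pv_inner_closed (p : List Int) (v t : Int) :
    pvInner v t p
      = t + (p.length : Int) * v - p.sum + (p.count (v + 1) : Int) - (p.count (v - 1) : Int) := by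
  induction p generalizing t with
  | nil => simp [pvInner]
  | cons u q ih =>
    simp only [pvInner, List.foldl_cons] at ih ⊢
    rw [ih]
    simp only [List.length_cons, List.sum_cons, List.count_cons]
    by_cases h1 : v - u = 1
    · have hu : u = v - 1 := by omega
      subst hu
      have : ¬ (v - 1 = v + 1) := by omega
      simp [h1, this]
      ring
    · by_cases h2 : v - u = -1
      · have hu : u = v + 1 := by omega
        subst hu
        have : ¬ (v + 1 = v - 1) := by omega
        simp [h2, this]
        ring
      · have hn1 : ¬ (u = v + 1) := by omega
        have hn2 : ¬ (u = v - 1) := by omega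
        simp [h1, h2, hn1, hn2]
        ring

-- ---- A's fold equals the canonical fold ----

-- inserting 0 at an absent key does not change any getD-with-default-0 view
theorem pv_getD0_condins (d : PySem.Dict Int Int) (k x : Int) :
    (if d.contains k then d else d.insert k 0).getD x 0 = d.getD x 0 := by
  split
  · rfl
  · rename_i h
    rw [PySem.Dict.getD_insert]
    split
    · rename_i hx; subst hx
      rw [PySem.Dict.getD_of_not_contains]
      simpa using h
    · rfl

-- coupled-loop invariant: A's fold over the rest equals the canonical fold, given the dict counts the seen prefix
theorem pv_rel (l : List Int) (d : PySem.Dict Int Int) (ad : Int) (p : List Int)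
    (hd : ∀ x, d.getD x 0 = (p.count x : Int)) :
    ((PySem.List.enumerate l (p.length : Int)).foldl pvStepA (d, ad, p.sum)).2.1
      = (l.foldl pvStepB (ad, p)).1 := by
  induction l generalizing d ad p with
  | nil => simp [PySem.List.enumerate_nil]
  | cons v t ih =>
    rw [PySem.List.enumerate_cons]
    simp only [List.foldl_cons]
    have hd3 : ∀ x, ((pvStepA (d, ad, p.sum) ((p.length : Int), v)).1).getD x 0
        = ((p ++ [v]).count x : Int) := by
      intro x
      simp only [pvStepA]
      rw [PySem.Dict.getD_modify]
      by_cases hx : x = v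
      · subst hx
        rw [if_pos rfl]
        simp only [pv_getD0_condins]
        rw [hd]
        simp [List.count_append]
      · rw [if_neg hx]
        simp only [pv_getD0_condins]
        rw [hd]
        simp [List.count_append, Ne.symm hx]
    have had : (pvStepA (d, ad, p.sum) ((p.length : Int), v)).2.1 = pvInner v ad p := by
      simp only [pvStepA]
      simp only [pv_getD0_condins]
      rw [hd (v + 1), hd (v - 1), pv_inner_closed]
    have hsum : (pvStepA (d, ad, p.sum) ((p.length : Int), v)).2.2 = (p ++ [v]).sum := by
      simp [pvStepA]
    have hrw : (pvStepA (d, ad, p.sum) ((p.length : Int), v))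
        = ((pvStepA (d, ad, p.sum) ((p.length : Int), v)).1, pvInner v ad p, (p ++ [v]).sum) := by
      rw [← had, ← hsum]
    have hB : pvStepB (ad, p) v = (pvInner v ad p, p ++ [v]) := rfl
    have hlen : ((p.length : Int) + 1) = (((p ++ [v]).length : Int)) := by simp
    rw [hB, hrw, hlen]
    exact ih _ _ _ hd3

theorem pv_A_eq_tot (array : List Int) : almost_difference array = pvTot array := by
  unfold almost_difference
  simp only [PySem.List.len_eq]
  split
  · rename_i h1
    match array, h1 with
    | [x], _ => simp [pvTot, pvStepB, pvInner]
  · have h0 : ∀ x : Int, (PySem.Dict.empty : PySem.Dict Int Int).getD x 0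
        = (([] : List Int).count x : Int) := by
      intro x; simp [PySem.Dict.getD_empty]
    have := pv_rel array PySem.Dict.empty 0 [] h0
    simpa [pvTot] using this

-- ---- B's divide and conquer equals the canonical fold ----

-- the second component of the canonical fold is the seen list
theorem pv_fold_snd (l p : List Int) (ad : Int) :
    (l.foldl pvStepB (ad, p)).2 = p ++ l := by
  induction l generalizing ad p with
  | nil => simp
  | cons v t ih => simp [pvStepB, ih]

-- the accumulator is affine: shift the initial total out
theorem pv_fold_shift (l p : List Int) (ad : Int) :
    (l.foldl pvStepB (ad, p)).1 = ad + (l.foldl pvStepB (0, p)).1 := by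
  induction l generalizing ad p with
  | nil => simp
  | cons v t ih =>
    simp only [List.foldl_cons, pvStepB]
    rw [ih (p ++ [v]) (pvInner v ad p), ih (p ++ [v]) (pvInner v 0 p)]
    rw [pv_inner_closed, pv_inner_closed]
    ring

-- splitting the seen prefix: extra seen elements contribute a per-element sum
theorem pv_seen_split (l p q : List Int) (ad : Int) :
    (l.foldl pvStepB (ad, p ++ q)).1
      = (l.foldl pvStepB (ad, q)).1 + (l.map (fun v => pvInner v 0 p)).sum := by
  induction l generalizing ad q with
  | nil => simp
  | cons v t ih =>
    simp only [List.foldl_cons, pvStepB, List.map_cons, List.sum_cons]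
    have hassoc : p ++ q ++ [v] = p ++ (q ++ [v]) := by simp
    rw [hassoc, ih (q ++ [v]) (pvInner v ad (p ++ q))]
    have hv : pvInner v ad (p ++ q) = pvInner v ad q + pvInner v 0 p := by
      rw [pv_inner_closed, pv_inner_closed, pv_inner_closed]
      simp only [List.length_append, List.sum_append, List.count_append]
      push_cast
      ring
    rw [hv, pv_fold_shift t (q ++ [v]) (pvInner v ad q + pvInner v 0 p),
      pv_fold_shift t (q ++ [v]) (pvInner v ad q)]
    ring

-- the canonical total splits over an append with the cross term Σ_{v∈R} pvInner v 0 L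
theorem pv_tot_append (L R : List Int) :
    pvTot (L ++ R) = pvTot L + pvTot R + (R.map (fun v => pvInner v 0 L)).sum := by
  unfold pvTot
  rw [List.foldl_append]
  have h2 : (L.foldl pvStepB (0, [])).2 = L := by simpa using pv_fold_snd L [] 0
  have : (L.foldl pvStepB ((0 : Int), ([] : List Int))) = ((L.foldl pvStepB (0, [])).1, L) :=
    Prod.ext_iff.mpr ⟨rfl, h2⟩
  rw [this, pv_fold_shift R L ((L.foldl pvStepB (0, [])).1)]
  conv_lhs => rw [show ((R.foldl pvStepB ((0 : Int), L)).1 = (R.foldl pvStepB (0, L ++ [])).1) from by simp]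
  rw [pv_seen_split R L [] 0]
  ring

-- B's correction loop in closed form
theorem pv_corr_fold (R L : List Int) (c0 : Int) :
    (R.foldl (fun c v => c - (((PySem.Dict.counter L).getD (v - 1) 0) - ((PySem.Dict.counter L).getD (v + 1) 0))) c0)
      = c0 + (R.map (fun v => (L.count (v + 1) : Int) - (L.count (v - 1) : Int))).sum := by
  induction R generalizing c0 with
  | nil => simp
  | cons v t ih =>
    simp only [List.foldl_cons, List.map_cons, List.sum_cons]
    rw [ih, PySem.Dict.getD_counter, PySem.Dict.getD_counter]
    ring

-- the cross term in the form B computes it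
theorem pv_cross_closed (R L : List Int) :
    (R.map (fun v => pvInner v 0 L)).sum
      = (L.length : Int) * R.sum - (R.length : Int) * L.sum
        + (R.map (fun v => (L.count (v + 1) : Int) - (L.count (v - 1) : Int))).sum := by
  induction R with
  | nil => simp
  | cons v t ih =>
    simp only [List.map_cons, List.sum_cons, List.length_cons, List.sum_cons]
    rw [ih, pv_inner_closed]
    push_cast
    ring

-- B equals the canonical total, by strong induction on the length
theorem pv_alt_eq_tot : ∀ (n : Nat) (l : List Int), l.length ≤ n → almost_difference_alt l = pvTot l := by
  intro n
  induction n with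
  | zero =>
    intro l hl
    have : l = [] := List.length_eq_zero_iff.mp (Nat.le_zero.mp hl)
    subst this
    rw [almost_difference_alt]
    simp [pvTot]
  | succ m ih =>
    intro l hl
    rw [almost_difference_alt]
    simp only [PySem.List.len_eq, pv_mid, PySem.List.slice_to_natCast, PySem.List.slice_from_natCast]
    by_cases hsmall : (l.length : Int) < 2
    · rw [if_pos hsmall]
      match l, hsmall with
      | [], _ => simp [pvTot]
      | [x], _ => simp [pvTot, pvStepB, pvInner]
    · rw [if_neg hsmall]
      have hlen : 2 ≤ l.length := by exact_mod_cast not_lt.mp hsmall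
      have htk : (l.take (l.length / 2)).length ≤ m := by
        simp only [List.length_take]
        omega
      have hdr : (l.drop (l.length / 2)).length ≤ m := by
        simp only [List.length_drop]
        omega
      rw [ih _ htk, ih _ hdr]
      rw [PySem.Dict.foldl_insert_getD_add_one_eq_counter]
      rw [pv_corr_fold]
      have hsplit : l = l.take (l.length / 2) ++ l.drop (l.length / 2) := (List.take_append_drop _ l).symm
      conv_rhs => rw [hsplit]
      rw [pv_tot_append, pv_cross_closed]

-- ===== VERDICT (by name: the statement is the Claim_ definition above) =====
theorem almost_difference_spec : Claim_equal_almost_difference := by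
  intro array _
  show almost_difference array = almost_difference_alt array
  rw [pv_A_eq_tot, pv_alt_eq_tot array.length array (le_refl _)]
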